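-- pv_equiv track=rewrite | github.com/Geon-05/dailycoding | programmers_코딩테스트/01_기초/day24/day24_1.py | solution
-- ===== SOURCE A (Python) =====
-- def solution(order):
--     answer = 0
--     for order_pro in order:
--         if 'latte' in order_pro:
--             answer += 5000
--             continue
--         answer += 4500
--     return answer
-- ===== SOURCE B (Python) =====
-- def solution(order):
--     # divide and conquer: price singletons, sum the two halves
--     if not order:
--         return 0
--     if len(order) == 1:
--         return 5000 if 'latte' in order[0] else 4500
--     mid = len(order) // 2
--     return solution(order[:mid]) + solution(order[mid:])
-- ===== Notes on version B (the rewrite author's own statement) =====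
-- stated objective: alternative
-- what changed: Replaces the left-to-right accumulating branch loop with a divide-and-conquer recursion: split the list at the midpoint, price each half recursively, price a singleton directly, and add the two sums.
import Mathlib
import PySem

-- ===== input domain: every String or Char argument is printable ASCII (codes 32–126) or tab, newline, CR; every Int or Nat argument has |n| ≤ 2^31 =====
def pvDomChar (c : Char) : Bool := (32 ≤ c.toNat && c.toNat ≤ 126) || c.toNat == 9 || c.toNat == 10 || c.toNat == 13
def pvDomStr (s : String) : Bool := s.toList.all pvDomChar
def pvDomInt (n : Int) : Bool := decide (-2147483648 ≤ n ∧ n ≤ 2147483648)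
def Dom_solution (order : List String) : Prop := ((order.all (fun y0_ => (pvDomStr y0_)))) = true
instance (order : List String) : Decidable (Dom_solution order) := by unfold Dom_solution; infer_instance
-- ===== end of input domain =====

-- B prices the order by divide-and-conquer (split at the midpoint, recurse on halves) instead of A's accumulating branch loop; objective: alternative.


-- ===== PORT A =====
def solution (order : List String) : Int :=
  order.foldl (fun answer order_pro =>
    if PySem.Str.isIn "latte" order_pro then answer + 5000 else answer + 4500) 0

-- ===== PORT B =====
-- divide-and-conquer: split at the midpoint, price halves recursively
def solution_alt (order : List String) : Int :=
  if order.isEmpty then 0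
  else if order.length = 1 then
    (if PySem.Str.isIn "latte" (order.headD "") then 5000 else 4500)
  else
    let mid : Int := PySem.Int.floordiv (order.length : Int) 2
    solution_alt (PySem.List.slice order none (some mid))
      + solution_alt (PySem.List.slice order (some mid) none)
termination_by order.length
decreasing_by
  all_goals
    rename_i h1 h2
    have hne : order ≠ [] := by simpa [List.isEmpty_iff] using h1
    have hlen : 1 ≤ order.length := List.length_pos_iff.mpr hne
    have hm : PySem.Int.floordiv ((order.length : Int)) 2 = ((order.length / 2 : Nat) : Int) := by
      rw [PySem.Int.floordiv_eq_ediv_of_pos (by norm_num)]; omega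
    rw [hm]
    first
    | (rw [PySem.List.slice_to_natCast]; simp only [List.length_take]; omega)
    | (rw [PySem.List.slice_from_natCast]; simp only [List.length_drop]; omega)

-- ===== PRECONDITION & SPEC =====
def Spec_solution (order : List String) (out : Int) : Prop := out = solution_alt order
instance (order : List String) (out : Int) : Decidable (Spec_solution order out) := by unfold Spec_solution; infer_instance

-- ===== CLAIM (what is proved, stated in full; the proofs are below) =====
def Claim_equal_solution : Prop := ∀ (order : List String), Dom_solution order → Spec_solution order (solution order)

-- ===== LEMMAS AND PROOFS =====

-- ===== VERDICT (by name: the statement is the Claim_ definition above) =====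
-- pricing function both programs compute
def pvPrice (order : List String) : Int :=
  4500 * (order.length : Int) + 500 * (order.countP (fun o => PySem.Str.isIn "latte" o) : Int)

theorem pvPrice_append (xs ys : List String) :
    pvPrice (xs ++ ys) = pvPrice xs + pvPrice ys := by
  simp [pvPrice, List.countP_append]
  ring

theorem solution_alt_eq_aux (n : Nat) : ∀ (order : List String), order.length ≤ n →
    solution_alt order = pvPrice order := by
  induction n with
  | zero =>
    intro order h
    have : order = [] := List.eq_nil_of_length_eq_zero (Nat.le_zero.mp h)
    subst this
    simp [solution_alt, pvPrice]
  | succ n ih =>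
    intro order h
    rw [solution_alt]
    by_cases he : order.isEmpty
    · have : order = [] := List.isEmpty_iff.mp he
      subst this; simp [pvPrice]
    · simp only [he]
      by_cases h1 : order.length = 1
      · match order, h1 with
        | [x], _ => simp [pvPrice]; split_ifs <;> norm_num
      · simp only [h1, if_false]
        have hne : order ≠ [] := by simpa [List.isEmpty_iff] using he
        have hlen : 1 ≤ order.length := List.length_pos_iff.mpr hne
        have hm : PySem.Int.floordiv ((order.length : Int)) 2 = ((order.length / 2 : Nat) : Int) := by
          rw [PySem.Int.floordiv_eq_ediv_of_pos (by norm_num)]; omega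
        rw [hm, PySem.List.slice_to_natCast, PySem.List.slice_from_natCast]
        rw [ih _ (by simp only [List.length_take]; omega),
            ih _ (by simp only [List.length_drop]; omega)]
        rw [← pvPrice_append, List.take_append_drop]
        simp

theorem solution_alt_eq (order : List String) : solution_alt order = pvPrice order :=
  solution_alt_eq_aux order.length order le_rfl

theorem solution_foldl (order : List String) (acc : Int) :
    order.foldl (fun answer order_pro =>
      if PySem.Str.isIn "latte" order_pro then answer + 5000 else answer + 4500) acc
      = acc + pvPrice order := by
  induction order generalizing acc with
  | nil => simp [pvPrice]
  | cons h t ih =>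
    simp only [List.foldl, List.length_cons, List.countP_cons, pvPrice]
    rw [ih]
    simp only [pvPrice]
    split_ifs <;> push_cast <;> ring

theorem solution_spec : Claim_equal_solution := by
  intro order _
  unfold Spec_solution solution
  rw [solution_foldl, solution_alt_eq]
  ring
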